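-- pv_equiv track=rewrite | github.com/dabrewskie/owens-lifeos | scripts/anticipation_engine.py | generate_brief
-- ===== SOURCE A (Python) =====
-- def generate_brief(findings: list, state: dict) -> str:
--     """Generate brief output. Silent when all clear."""
--     if not findings:
--         return ""
--
--     lines = ["=== ANTICIPATION ENGINE ==="]
--
--     # NEXT 48H
--     next48 = [f for f in findings if f["category"] == "NEXT_48H"]
--     if next48:
--         lines.append("NEXT 48H:")
--         for f in next48:
--             lines.append(f"  {'!!' if f['priority']=='HIGH' else '-'} {f['message']}")
--
--     # PATTERNS
--     patterns = [f for f in findings if f["category"] == "PATTERN"]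
--     if patterns:
--         lines.append("PATTERNS:")
--         for f in patterns:
--             lines.append(f"  {'!!' if f['priority']=='HIGH' else '-'} {f['message']}")
--
--     # SYSTEM
--     system = [f for f in findings if f["category"] == "SYSTEM"]
--     if system:
--         system_msgs = [f["message"] for f in system]
--         lines.append("SYSTEM: " + " | ".join(system_msgs))
--
--     lines.append("===")
--     return "\n".join(lines)
-- ===== SOURCE B (Python) =====
-- def generate_brief(findings: list, state: dict) -> str:
--     """Generate brief output. Silent when all clear."""
--     if not findings:
--         return ""
--     next48, patterns, system_msgs = [], [], []
--     for f in findings: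
--         cat = f["category"]
--         if cat == "NEXT_48H":
--             next48.append(f"  {'!!' if f['priority']=='HIGH' else '-'} {f['message']}")
--         elif cat == "PATTERN":
--             patterns.append(f"  {'!!' if f['priority']=='HIGH' else '-'} {f['message']}")
--         elif cat == "SYSTEM":
--             system_msgs.append(f["message"])
--     lines = ["=== ANTICIPATION ENGINE ==="]
--     if next48:
--         lines.append("NEXT 48H:")
--         lines.extend(next48)
--     if patterns:
--         lines.append("PATTERNS:")
--         lines.extend(patterns)
--     if system_msgs:
--         lines.append("SYSTEM: " + " | ".join(system_msgs))
--     lines.append("===")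
--     return "\n".join(lines)
-- ===== Notes on version B (the rewrite author's own statement) =====
-- stated objective: simpler
-- what changed: Replaces the three separate filtering scans over findings with a single pass that accumulates the three category buckets (already formatted) at once, followed by a fixed-order emission.
import Mathlib
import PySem

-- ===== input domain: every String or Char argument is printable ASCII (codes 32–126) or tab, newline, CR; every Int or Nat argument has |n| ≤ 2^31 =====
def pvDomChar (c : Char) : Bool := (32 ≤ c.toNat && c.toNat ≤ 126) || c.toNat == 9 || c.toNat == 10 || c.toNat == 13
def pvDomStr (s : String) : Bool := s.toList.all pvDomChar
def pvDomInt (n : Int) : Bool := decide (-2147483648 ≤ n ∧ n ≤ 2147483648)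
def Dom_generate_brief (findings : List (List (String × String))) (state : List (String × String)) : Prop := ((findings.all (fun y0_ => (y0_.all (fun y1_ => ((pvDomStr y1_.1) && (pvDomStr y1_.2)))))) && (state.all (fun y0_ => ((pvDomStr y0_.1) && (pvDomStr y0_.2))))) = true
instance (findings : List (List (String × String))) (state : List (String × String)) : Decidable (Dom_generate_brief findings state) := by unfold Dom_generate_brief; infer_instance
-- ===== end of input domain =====

-- B replaces A's three repeated filtering scans with a single pass that buckets the findings
-- by category (already formatted), then a fixed-order emission; return value only, simpler.


-- ===== PORT A =====
-- f[k] on a dict (assoc list, first match); total form, exact under Pre_ (which guarantees the key is present)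
def pvDGet (f : List (String × String)) (k : String) : String :=
  ((f.find? (fun p => p.1 == k)).map Prod.snd).getD ""

-- f"  {'!!' if f['priority']=='HIGH' else '-'} {f['message']}"  (shared verbatim by both Pythons)
def pvFmtLine (f : List (String × String)) : String :=
  "  " ++ (if pvDGet f "priority" == "HIGH" then "!!" else "-") ++ " " ++ pvDGet f "message"

def generate_brief (findings : List (List (String × String))) (state : List (String × String)) : String :=
  if findings = [] then "" else
  let lines0 := ["=== ANTICIPATION ENGINE ==="]
  let next48 := findings.filter (fun f => pvDGet f "category" == "NEXT_48H")
  let lines1 := if next48 = [] then lines0 else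
    next48.foldl (fun ls f => ls ++ [pvFmtLine f]) (lines0 ++ ["NEXT 48H:"])
  let patterns := findings.filter (fun f => pvDGet f "category" == "PATTERN")
  let lines2 := if patterns = [] then lines1 else
    patterns.foldl (fun ls f => ls ++ [pvFmtLine f]) (lines1 ++ ["PATTERNS:"])
  let system := findings.filter (fun f => pvDGet f "category" == "SYSTEM")
  let lines3 := if system = [] then lines2 else
    lines2 ++ ["SYSTEM: " ++ PySem.Str.join " | " (system.map (fun f => pvDGet f "message"))]
  PySem.Str.join "\n" (lines3 ++ ["==="])

-- ===== PORT B =====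
-- single pass: the loop body of Source B, accumulating the three buckets at once
def pvBucketStep (acc : List String × List String × List String) (f : List (String × String)) :
    List String × List String × List String :=
  let cat := pvDGet f "category"
  if cat == "NEXT_48H" then (acc.1 ++ [pvFmtLine f], acc.2.1, acc.2.2)
  else if cat == "PATTERN" then (acc.1, acc.2.1 ++ [pvFmtLine f], acc.2.2)
  else if cat == "SYSTEM" then (acc.1, acc.2.1, acc.2.2 ++ [pvDGet f "message"])
  else acc

def generate_brief_alt (findings : List (List (String × String))) (state : List (String × String)) : String :=
  if findings = [] then "" else
  let acc := findings.foldl pvBucketStep ([], [], [])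
  let lines := ["=== ANTICIPATION ENGINE ==="]
    ++ (if acc.1 = [] then [] else "NEXT 48H:" :: acc.1)
    ++ (if acc.2.1 = [] then [] else "PATTERNS:" :: acc.2.1)
    ++ (if acc.2.2 = [] then [] else ["SYSTEM: " ++ PySem.Str.join " | " acc.2.2])
    ++ ["==="]
  PySem.Str.join "\n" lines

-- ===== PRECONDITION & SPEC =====
-- Pre_ excludes exactly the inputs where Python A raises KeyError: a finding without a
-- "category" key, or a NEXT_48H/PATTERN finding missing "priority"/"message", or a SYSTEM
-- finding missing "message".
def pvHasKey (f : List (String × String)) (k : String) : Bool := f.any (fun p => p.1 == k)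

def Pre_generate_brief (findings : List (List (String × String))) (state : List (String × String)) : Prop :=
  ∀ f ∈ findings, pvHasKey f "category" = true ∧
    ((pvDGet f "category" = "NEXT_48H" ∨ pvDGet f "category" = "PATTERN") →
      pvHasKey f "priority" = true ∧ pvHasKey f "message" = true) ∧
    (pvDGet f "category" = "SYSTEM" → pvHasKey f "message" = true)

instance (findings : List (List (String × String))) (state : List (String × String)) : Decidable (Pre_generate_brief findings state) := by unfold Pre_generate_brief; infer_instance

def pvWitness_generate_brief : (List (List (String × String))) × (List (String × String)) :=
  ([[("category", "NEXT_48H"), ("priority", "HIGH"), ("message", "renew passport")],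
    [("category", "SYSTEM"), ("message", "db ok")]], [])

def Spec_generate_brief (findings : List (List (String × String))) (state : List (String × String)) (out : String) : Prop := out = generate_brief_alt findings state
instance (findings : List (List (String × String))) (state : List (String × String)) (out : String) : Decidable (Spec_generate_brief findings state out) := by unfold Spec_generate_brief; infer_instance

-- ===== CLAIM (what is proved, stated in full; the proofs are below) =====
def Claim_equal_generate_brief : Prop := ∀ (findings : List (List (String × String))) (state : List (String × String)), Dom_generate_brief findings state → Pre_generate_brief findings state → Spec_generate_brief findings state (generate_brief findings state)

-- ===== LEMMAS AND PROOFS =====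

-- B's single grouping pass equals A's three filters (with the per-bucket formatting applied)
theorem pvBucket_foldl (fs : List (List (String × String)))
    (a b c : List String) :
    fs.foldl pvBucketStep (a, b, c) =
      (a ++ (fs.filter (fun f => pvDGet f "category" == "NEXT_48H")).map pvFmtLine,
       b ++ (fs.filter (fun f => pvDGet f "category" == "PATTERN")).map pvFmtLine,
       c ++ (fs.filter (fun f => pvDGet f "category" == "SYSTEM")).map (fun f => pvDGet f "message")) := by
  induction fs generalizing a b c with
  | nil => simp
  | cons f fs ih =>
    by_cases h1 : pvDGet f "category" == "NEXT_48H"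
    · have h2 : ¬ (pvDGet f "category" == "PATTERN") := by
        simp_all
      have h3 : ¬ (pvDGet f "category" == "SYSTEM") := by
        simp_all
      simp [List.foldl_cons, pvBucketStep, h1, h2, h3, ih, List.filter_cons]
    · by_cases h2 : pvDGet f "category" == "PATTERN"
      · have h3 : ¬ (pvDGet f "category" == "SYSTEM") := by simp_all
        simp [List.foldl_cons, pvBucketStep, h1, h2, h3, ih, List.filter_cons]
      · by_cases h3 : pvDGet f "category" == "SYSTEM"
        · simp [List.foldl_cons, pvBucketStep, h1, h2, h3, ih, List.filter_cons]
        · simp [List.foldl_cons, pvBucketStep, h1, h2, h3, ih, List.filter_cons]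

-- ===== VERDICT (by name: the statement is the Claim_ definition above) =====
theorem generate_brief_spec : Claim_equal_generate_brief := by
  intro findings state _ _
  unfold Spec_generate_brief generate_brief generate_brief_alt
  by_cases hnil : findings = []
  · simp [hnil]
  · simp only [hnil, if_false]
    rw [pvBucket_foldl]
    simp only [List.nil_append, List.map_eq_nil_iff]
    rw [PySem.List.foldl_append_singleton_eq_map, PySem.List.foldl_append_singleton_eq_map]
    split_ifs <;> simp [List.append_assoc]
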